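-- pv_equiv track=rewrite | github.com/tejdeeppathipati/TennisIQ | eval/run_eval.py | _match_events_with_tolerance
-- ===== SOURCE A (Python) =====
-- from typing import Dict, List, Tuple
--
-- def _match_events_with_tolerance(pred: List[int], truth: List[int], tol: int = 3) -> Tuple[int, int, int]:
--     pred = sorted(pred)
--     truth = sorted(truth)
--     used = [False] * len(truth)
--     tp = 0
--     for p in pred:
--         found = False
--         for i, t in enumerate(truth):
--             if used[i]:
--                 continue
--             if abs(p - t) <= tol:
--                 used[i] = True
--                 tp += 1
--                 found = True
--                 break
--         if not found:
--             pass
--     fp = len(pred) - tp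
--     fn = len(truth) - tp
--     return tp, fp, fn
-- ===== SOURCE B (Python) =====
-- def _match_events_with_tolerance(pred, truth, tol=3):
--     ps = sorted(pred)
--     ts = sorted(truth)
--     j = 0
--     tp = 0
--     for p in ps:
--         # skip truths that are too small to match this (or any later) prediction
--         while j < len(ts) and ts[j] < p - tol:
--             j += 1
--         if j < len(ts) and ts[j] <= p + tol:
--             tp += 1
--             j += 1
--     return tp, len(pred) - tp, len(truth) - tp
-- ===== Notes on version B (the rewrite author's own statement) =====
-- stated objective: faster
-- what changed: Replaced the per-prediction linear scan over a used[] array by a two-pointer sweep over the two sorted lists: a single pointer into truth advances monotonically, matching each prediction to the first still-available truth within tolerance.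
import Mathlib
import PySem

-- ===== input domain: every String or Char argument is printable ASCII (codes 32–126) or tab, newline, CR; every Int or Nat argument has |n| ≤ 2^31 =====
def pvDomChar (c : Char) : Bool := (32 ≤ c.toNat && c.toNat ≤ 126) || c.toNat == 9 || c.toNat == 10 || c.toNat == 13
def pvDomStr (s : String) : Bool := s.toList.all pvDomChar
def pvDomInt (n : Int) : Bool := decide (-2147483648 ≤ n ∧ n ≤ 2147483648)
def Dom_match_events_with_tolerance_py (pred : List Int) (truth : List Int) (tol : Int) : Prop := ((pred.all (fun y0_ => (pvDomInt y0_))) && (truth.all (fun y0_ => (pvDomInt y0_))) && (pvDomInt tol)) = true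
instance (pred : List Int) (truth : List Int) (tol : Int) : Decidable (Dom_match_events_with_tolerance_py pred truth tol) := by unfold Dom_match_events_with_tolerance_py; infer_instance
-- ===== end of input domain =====

-- B replaces A's per-prediction linear scan over a used[] array by a two-pointer
-- sweep over the two sorted lists (objective: faster mechanism, O(n+m) matching
-- sweep after sorting instead of O(n*m)). Return value only; neither mutates.

-- ===== PORT A =====
-- inner loop: 'for i, t in enumerate(truth): if used[i]: continue; if abs(p-t)<=tol: mark, break'
-- walks used and truth in parallel; returns the updated used list on a match, none if no match.
def aScan (p tol : Int) : List Bool → List Int → Option (List Bool)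
  | u :: us, t :: ts =>
    if u then (aScan p tol us ts).map (u :: ·)
    else if |p - t| ≤ tol then some (true :: us)
    else (aScan p tol us ts).map (u :: ·)
  | _, _ => none

-- outer loop: 'for p in pred: …' folding the (used, tp) state
def aFold (tol : Int) (ts : List Int) (st : List Bool × Int) (ps : List Int) : List Bool × Int :=
  ps.foldl (fun st p =>
    match aScan p tol st.1 ts with
    | some u => (u, st.2 + 1)
    | none => st) st

def match_events_with_tolerance_py (pred : List Int) (truth : List Int) (tol : Int) : List Int :=
  let ps := PySem.List.sorted pred (fun x => x) false
  let ts := PySem.List.sorted truth (fun x => x) false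
  let st := aFold tol ts (List.replicate ts.length false, 0) ps
  [st.2, (pred.length : Int) - st.2, (truth.length : Int) - st.2]

-- ===== PORT B =====
-- two-pointer sweep: the 'while' advancing j is dropWhile on the remaining truth suffix
def bLoop (tol : Int) (ps : List Int) (ts : List Int) (tp : Int) : Int :=
  match ps with
  | [] => tp
  | p :: ps' =>
    let ts' := ts.dropWhile (fun t => decide (t < p - tol))
    match ts' with
    | [] => bLoop tol ps' ts' tp
    | t :: rest => if t ≤ p + tol then bLoop tol ps' rest (tp + 1) else bLoop tol ps' ts' tp

def match_events_with_tolerance_py_alt (pred : List Int) (truth : List Int) (tol : Int) : List Int :=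
  let ps := PySem.List.sorted pred (fun x => x) false
  let ts := PySem.List.sorted truth (fun x => x) false
  let tp := bLoop tol ps ts 0
  [tp, (pred.length : Int) - tp, (truth.length : Int) - tp]

-- ===== PRECONDITION & SPEC =====
def Spec_match_events_with_tolerance_py (pred : List Int) (truth : List Int) (tol : Int) (out : List Int) : Prop := out = match_events_with_tolerance_py_alt pred truth tol
instance (pred : List Int) (truth : List Int) (tol : Int) (out : List Int) : Decidable (Spec_match_events_with_tolerance_py pred truth tol out) := by unfold Spec_match_events_with_tolerance_py; infer_instance

-- ===== CLAIM (what is proved, stated in full; the proofs are below) =====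
def Claim_equal_match_events_with_tolerance_py : Prop := ∀ (pred : List Int) (truth : List Int) (tol : Int), Dom_match_events_with_tolerance_py pred truth tol → Spec_match_events_with_tolerance_py pred truth tol (match_events_with_tolerance_py pred truth tol)

-- ===== LEMMAS AND PROOFS =====

-- A's scan skips a processed prefix whose unused entries are all below p - tol
lemma aScan_append_prefix (p tol : Int) :
    ∀ (us1 : List Bool) (ts1 : List Int) (v : List Bool) (w : List Int),
      us1.length = ts1.length →
      (∀ pr ∈ us1.zip ts1, pr.1 = false → pr.2 < p - tol) →
      aScan p tol (us1 ++ v) (ts1 ++ w) = (aScan p tol v w).map (us1 ++ ·) := by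
  intro us1
  induction us1 with
  | nil =>
    intro ts1 v w hlen hinv
    have : ts1 = [] := by cases ts1 <;> simp_all
    subst this
    simp
  | cons u us ih =>
    intro ts1 v w hlen hinv
    cases ts1 with
    | nil => simp at hlen
    | cons t ts1' =>
      have hlen' : us.length = ts1'.length := by simpa using hlen
      have hinv' : ∀ pr ∈ us.zip ts1', pr.1 = false → pr.2 < p - tol := by
        intro pr hpr; exact hinv pr (by simp [hpr])
      have hrec := ih ts1' v w hlen' hinv'
      have hstep : aScan p tol ((u :: us) ++ v) ((t :: ts1') ++ w)
          = (aScan p tol (us ++ v) (ts1' ++ w)).map (u :: ·) := by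
        by_cases hu : u = true
        · subst hu; simp [aScan]
        · have hu' : u = false := by simpa using hu
          subst hu'
          have ht : t < p - tol := hinv (false, t) (by simp) rfl
          have habs : ¬ |p - t| ≤ tol := by
            intro h
            have h1 : p - t ≤ |p - t| := le_abs_self _
            omega
          simp [aScan, habs]
      rw [hstep, hrec]
      cases aScan p tol v w <;> simp

-- A's scan over an all-unused sorted suffix: skip the takeWhile block, then match the head
lemma aScan_fresh_some (p tol : Int) :
    ∀ (d : List Int) (t : Int) (rest : List Int),
      (∀ x ∈ d, x < p - tol) → ¬ t < p - tol → t ≤ p + tol →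
      aScan p tol (List.replicate (d ++ t :: rest).length false) (d ++ t :: rest)
        = some (List.replicate d.length false ++ true :: List.replicate rest.length false) := by
  intro d
  induction d with
  | nil =>
    intro t rest _ ht1 ht2
    have habs : |p - t| ≤ tol := by rw [abs_le]; omega
    simp [aScan, List.replicate_succ, habs]
  | cons x d' ih =>
    intro t rest hd ht1 ht2
    have hx : x < p - tol := hd x (by simp)
    have habs : ¬ |p - x| ≤ tol := by
      intro h
      have h1 : p - x ≤ |p - x| := le_abs_self _
      omega
    have hrec := ih t rest (fun y hy => hd y (by simp [hy])) ht1 ht2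
    have hstep : aScan p tol (false :: List.replicate (d' ++ t :: rest).length false) (x :: (d' ++ t :: rest))
        = (aScan p tol (List.replicate (d' ++ t :: rest).length false) (d' ++ t :: rest)).map (false :: ·) := by
      simp [aScan, habs]
    rw [List.cons_append, List.length_cons, List.replicate_succ, hstep, hrec]
    simp [List.replicate_succ]

-- A's scan finds nothing when every truth entry is out of tolerance
lemma aScan_fresh_none (p tol : Int) :
    ∀ (ts2 : List Int), (∀ x ∈ ts2, ¬ |p - x| ≤ tol) →
      aScan p tol (List.replicate ts2.length false) ts2 = none := by
  intro ts2
  induction ts2 with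
  | nil => intro _; simp [aScan]
  | cons t ts ih =>
    intro h
    have habs : ¬ |p - t| ≤ tol := h t (by simp)
    simp [List.replicate_succ, aScan, habs, ih (fun y hy => h y (by simp [hy]))]

-- main invariant induction over the sorted predictions: A's state is the processed
-- prefix ts1 with used flags us1 (whose unused entries are below every remaining
-- prediction minus tol) plus the untouched suffix ts2, which is B's window
lemma main_inv (tol : Int) :
    ∀ (ps : List Int) (us1 : List Bool) (ts1 ts2 : List Int) (tp : Int),
      ps.Pairwise (· ≤ ·) →
      ts2.Pairwise (· ≤ ·) →
      us1.length = ts1.length →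
      (∀ pr ∈ us1.zip ts1, pr.1 = false → ∀ p ∈ ps, pr.2 < p - tol) →
      (aFold tol (ts1 ++ ts2) (us1 ++ List.replicate ts2.length false, tp) ps).2
        = bLoop tol ps ts2 tp := by
  intro ps
  induction ps with
  | nil => intro us1 ts1 ts2 tp _ _ _ _; simp [aFold, bLoop]
  | cons p ps' ih =>
    intro us1 ts1 ts2 tp hps hts2 hlen hinv
    have hhead : ∀ q ∈ ps', p ≤ q := (List.pairwise_cons.mp hps).1
    have hps' : ps'.Pairwise (· ≤ ·) := (List.pairwise_cons.mp hps).2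
    set d := ts2.takeWhile (fun t => decide (t < p - tol)) with hd_def
    set ts2' := ts2.dropWhile (fun t => decide (t < p - tol)) with hts2'_def
    have hsplit : d ++ ts2' = ts2 := List.takeWhile_append_dropWhile
    have hd : ∀ x ∈ d, x < p - tol := by
      intro x hx
      have := List.mem_takeWhile_imp hx
      simpa using this
    have hts2'sorted : ts2'.Pairwise (· ≤ ·) :=
      List.Pairwise.sublist (List.dropWhile_sublist _) hts2
    have hinv_p : ∀ pr ∈ us1.zip ts1, pr.1 = false → pr.2 < p - tol := by
      intro pr hpr hf; exact hinv pr hpr hf p (by simp)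
    have hinv_d : ∀ pr ∈ (us1 ++ List.replicate d.length false).zip (ts1 ++ d),
        pr.1 = false → ∀ q ∈ ps', pr.2 < q - tol := by
      intro pr hpr hf q hq
      rw [List.zip_append (by simpa using hlen)] at hpr
      rcases List.mem_append.mp hpr with h1 | h2
      · exact hinv pr h1 hf q (by simp [hq])
      · have := (List.of_mem_zip h2).2
        have hlt := hd pr.2 this
        have := hhead q hq
        omega
    have hlen_d : (us1 ++ List.replicate d.length false).length = (ts1 ++ d).length := by
      simp [hlen]
    cases hcase : ts2' with
    | nil =>
      -- every truth is either used or below p - tol: A finds no match, B's window is empty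
      have hts2_eq : ts2 = d := by rw [← hsplit, hcase, List.append_nil]
      have hts2_all : ∀ x ∈ ts2, x < p - tol := by
        intro x hx; rw [hts2_eq] at hx; exact hd x hx
      have hnone : aScan p tol (us1 ++ List.replicate ts2.length false) (ts1 ++ ts2)
          = none := by
        rw [aScan_append_prefix p tol us1 ts1 _ _ hlen hinv_p,
          aScan_fresh_none p tol ts2 (by
            intro x hx h
            have h1 : p - x ≤ |p - x| := le_abs_self _
            have := hts2_all x hx
            omega)]
        rfl
      have hstep : aFold tol (ts1 ++ ts2) (us1 ++ List.replicate ts2.length false, tp) (p :: ps')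
          = aFold tol (ts1 ++ ts2) (us1 ++ List.replicate ts2.length false, tp) ps' := by
        simp [aFold, hnone]
      rw [hstep, hts2_eq]
      have hih := ih (us1 ++ List.replicate d.length false) (ts1 ++ d) [] tp hps'
        (by simp) hlen_d (by simpa using hinv_d)
      simp only [List.append_nil, List.length_nil, List.replicate_zero] at hih
      rw [hih]
      have hdw : d.dropWhile (fun t => decide (t < p - tol)) = [] := by
        rw [show d = ts2 from hts2_eq.symm, ← hts2'_def]
        exact hcase
      simp [bLoop, hdw]
    | cons t rest =>
      have hdw : ts2.dropWhile (fun x => decide (x < p - tol)) = t :: rest := by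
        rw [← hts2'_def]; exact hcase
      have hthead : ¬ t < p - tol := by
        have h0 := List.head?_dropWhile_not (fun x => decide (x < p - tol)) ts2
        rw [hdw] at h0
        simpa using h0
      have hts2_eq : ts2 = d ++ t :: rest := by rw [← hsplit, hcase]
      have hrestsorted : rest.Pairwise (· ≤ ·) := by
        rw [hcase] at hts2'sorted
        exact (List.pairwise_cons.mp hts2'sorted).2
      have htle : ∀ x ∈ rest, t ≤ x := by
        rw [hcase] at hts2'sorted
        exact (List.pairwise_cons.mp hts2'sorted).1
      by_cases hmatch : t ≤ p + tol
      · -- A marks t, B advances past it; both count a match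
        have hsome : aScan p tol (us1 ++ List.replicate ts2.length false) (ts1 ++ ts2)
            = some (us1 ++ (List.replicate d.length false ++ true :: List.replicate rest.length false)) := by
          rw [hts2_eq, aScan_append_prefix p tol us1 ts1 _ _ hlen hinv_p,
            aScan_fresh_some p tol d t rest hd hthead hmatch]
          rfl
        have hstep : aFold tol (ts1 ++ ts2) (us1 ++ List.replicate ts2.length false, tp) (p :: ps')
            = aFold tol (ts1 ++ ts2)
                (us1 ++ (List.replicate d.length false ++ true :: List.replicate rest.length false), tp + 1) ps' := by
          simp [aFold, hsome]
        rw [hstep]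
        have hinv_new : ∀ pr ∈ (us1 ++ List.replicate d.length false ++ [true]).zip (ts1 ++ d ++ [t]),
            pr.1 = false → ∀ q ∈ ps', pr.2 < q - tol := by
          intro pr hpr hf q hq
          rw [List.zip_append (by simpa using hlen_d)] at hpr
          rcases List.mem_append.mp hpr with h1 | h2
          · exact hinv_d pr h1 hf q hq
          · have hone : pr.1 = true := by
              have := (List.of_mem_zip h2).1
              simpa using this
            rw [hf] at hone; exact absurd hone (by simp)
        have hih := ih (us1 ++ List.replicate d.length false ++ [true]) (ts1 ++ d ++ [t]) rest (tp + 1)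
          hps' hrestsorted (by simp [hlen]) hinv_new
        have harr1 : (ts1 ++ d ++ [t]) ++ rest = ts1 ++ ts2 := by rw [hts2_eq]; simp
        have harr2 : (us1 ++ List.replicate d.length false ++ [true]) ++ List.replicate rest.length false
            = us1 ++ (List.replicate d.length false ++ true :: List.replicate rest.length false) := by
          simp
        rw [harr1, harr2] at hih
        rw [hih]
        simp [bLoop, hdw, hmatch]
      · -- t is already beyond p + tol: A finds no match, B keeps the window
        have hts2_none : ∀ x ∈ ts2, ¬ |p - x| ≤ tol := by
          intro x hx h
          rw [hts2_eq] at hx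
          rcases List.mem_append.mp hx with h1 | h2
          · have := hd x h1
            have h1' : p - x ≤ |p - x| := le_abs_self _
            omega
          · have hxt : t ≤ x := by
              rcases List.mem_cons.mp h2 with h3 | h3
              · omega
              · exact htle x h3
            have h1' : x - p ≤ |p - x| := by
              have := neg_le_abs (p - x)
              omega
            omega
        have hnone : aScan p tol (us1 ++ List.replicate ts2.length false) (ts1 ++ ts2)
            = none := by
          rw [aScan_append_prefix p tol us1 ts1 _ _ hlen hinv_p,
            aScan_fresh_none p tol ts2 hts2_none]
          rfl
        have hstep : aFold tol (ts1 ++ ts2) (us1 ++ List.replicate ts2.length false, tp) (p :: ps')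
            = aFold tol (ts1 ++ ts2) (us1 ++ List.replicate ts2.length false, tp) ps' := by
          simp [aFold, hnone]
        rw [hstep]
        have hih := ih (us1 ++ List.replicate d.length false) (ts1 ++ d) (t :: rest) tp hps'
          (by rw [← hcase]; exact hts2'sorted) hlen_d hinv_d
        have harr1 : (ts1 ++ d) ++ t :: rest = ts1 ++ ts2 := by rw [hts2_eq]; simp
        have harr2 : (us1 ++ List.replicate d.length false) ++ List.replicate (t :: rest).length false
            = us1 ++ List.replicate ts2.length false := by
          rw [show List.replicate ts2.length (false : Bool)
              = List.replicate d.length false ++ List.replicate ts2'.length false from by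
            rw [← List.replicate_add]
            congr 1
            rw [← hsplit, List.length_append], hcase]
          simp
        rw [harr1, harr2] at hih
        rw [hih]
        simp [bLoop, hdw, hmatch]

-- ===== VERDICT (by name: the statement is the Claim_ definition above) =====
theorem match_events_with_tolerance_py_spec : Claim_equal_match_events_with_tolerance_py := by
  intro pred truth tol _
  unfold Spec_match_events_with_tolerance_py
  simp only [match_events_with_tolerance_py, match_events_with_tolerance_py_alt]
  have hps : (PySem.List.sorted pred (fun x => x) false).Pairwise (· ≤ ·) := by
    have := PySem.List.sorted_pairwise (xs := pred) (key := fun x => x)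
    simpa using this
  have hts : (PySem.List.sorted truth (fun x => x) false).Pairwise (· ≤ ·) := by
    have := PySem.List.sorted_pairwise (xs := truth) (key := fun x => x)
    simpa using this
  have h := main_inv tol (PySem.List.sorted pred (fun x => x) false) [] []
    (PySem.List.sorted truth (fun x => x) false) 0 hps hts rfl (by simp)
  simp only [List.nil_append] at h
  rw [h]
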